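-- pv_equiv track=rewrite | github.com/liskos/leletko | ege23/79.py | f
-- ===== SOURCE A (Python) =====
-- def f(a, b):
--     if a == 20:
--         return 0
--     if a == b:
--         return 1
--     if a > b:
--         return 0
--     return f(a+1, b) + f(a*3, b) + f(a*2, b)
-- ===== SOURCE B (Python) =====
-- def f(a, b):
--     if a == 20:
--         return 0
--     if a == b:
--         return 1
--     if a > b:
--         return 0
--     # bottom-up DP over the interval [a, b]: ways[x] = number of paths from x to b
--     ways = {b: 0 if b == 20 else 1}
--     for x in range(b - 1, a - 1, -1):
--         if x == 20:
--             ways[x] = 0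
--         else:
--             ways[x] = ways.get(x + 1, 0) + ways.get(3 * x, 0) + ways.get(2 * x, 0)
--     return ways[a]
-- ===== Notes on version B (the rewrite author's own statement) =====
-- stated objective: faster
-- what changed: Replaces the exponential triple-branch recursion by a single bottom-up dynamic-programming pass that fills a dict of path counts from b down to a.
import Mathlib
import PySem

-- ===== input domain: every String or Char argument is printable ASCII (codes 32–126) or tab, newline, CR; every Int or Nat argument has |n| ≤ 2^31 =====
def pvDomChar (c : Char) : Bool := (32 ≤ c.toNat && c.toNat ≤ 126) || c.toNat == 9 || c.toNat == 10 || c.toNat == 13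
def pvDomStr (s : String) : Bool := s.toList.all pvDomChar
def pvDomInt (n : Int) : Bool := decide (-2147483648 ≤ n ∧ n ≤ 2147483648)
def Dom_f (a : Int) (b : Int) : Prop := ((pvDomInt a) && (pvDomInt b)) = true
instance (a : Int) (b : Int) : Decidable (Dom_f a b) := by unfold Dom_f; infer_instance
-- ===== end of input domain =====

-- B replaces A's exponential triple-branch recursion by one bottom-up DP pass over [a, b] (asymptotically faster).

-- ===== PORT A =====
-- A's recursion, with a fuel counter as totality guard; inside Pre_f (1 ≤ a ∨ b ≤ a)
-- the fuel (b - a).toNat + 1 is always sufficient, so it never runs out.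
def fGo : Nat → Int → Int → Int
  | 0, _, _ => 0
  | n + 1, a, b =>
    if a = 20 then 0
    else if a = b then 1
    else if b < a then 0
    else fGo n (a + 1) b + fGo n (a * 3) b + fGo n (a * 2) b

def f (a : Int) (b : Int) : Int := fGo ((b - a).toNat + 1) a b

-- ===== PORT B =====
-- loop body of Source B's DP pass
def fAltStep (d : PySem.Dict Int Int) (x : Int) : PySem.Dict Int Int :=
  if x = 20 then d.insert x 0
  else d.insert x (d.getD (x + 1) 0 + d.getD (3 * x) 0 + d.getD (2 * x) 0)

def f_alt (a : Int) (b : Int) : Int :=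
  if a = 20 then 0
  else if a = b then 1
  else if b < a then 0
  else
    let init : PySem.Dict Int Int := PySem.Dict.empty.insert b (if b = 20 then 0 else 1)
    let ways := (PySem.List.pyRange (b - 1) (a - 1) (-1)).foldl fAltStep init
    -- Python's ways[a]; the loop always stores key a here (a < b), so no KeyError
    ways.getD a 0

-- ===== PRECONDITION & SPEC =====
-- Pre_f excludes exactly the inputs with a ≤ 0 and a < b, on which A recurses forever
-- (a*3 / a*2 do not grow past b) and raises RecursionError.
def Pre_f (a : Int) (b : Int) : Prop := 1 ≤ a ∨ b ≤ a
instance (a : Int) (b : Int) : Decidable (Pre_f a b) := by unfold Pre_f; infer_instance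
def pvWitness_f : Int × Int := (1, 10)
def Spec_f (a : Int) (b : Int) (out : Int) : Prop := out = f_alt a b
instance (a : Int) (b : Int) (out : Int) : Decidable (Spec_f a b out) := by unfold Spec_f; infer_instance

-- ===== CLAIM (what is proved, stated in full; the proofs are below) =====
def Claim_equal_f : Prop := ∀ (a : Int) (b : Int), Dom_f a b → Pre_f a b → Spec_f a b (f a b)

-- ===== LEMMAS AND PROOFS =====

-- The mathematical path count, by well-founded recursion (only meaningful for 1 ≤ a).
def pathCount (a b : Int) : Int :=
  if h : a < b ∧ 1 ≤ a ∧ a ≠ 20 then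
    pathCount (a + 1) b + pathCount (3 * a) b + pathCount (2 * a) b
  else if a = 20 then 0
  else if a = b then 1
  else 0
termination_by (b - a).toNat
decreasing_by
  · omega
  · omega
  · omega

lemma pathCount_of_ge (a b : Int) (hba : b < a) : pathCount a b = 0 := by
  rw [pathCount]
  rw [dif_neg (by omega : ¬ (a < b ∧ 1 ≤ a ∧ a ≠ 20))]
  split_ifs <;> omega

lemma pathCount_rec (x b : Int) (h : x < b ∧ 1 ≤ x ∧ x ≠ 20) :
    pathCount x b = pathCount (x + 1) b + pathCount (3 * x) b + pathCount (2 * x) b := by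
  conv_lhs => rw [pathCount]
  rw [dif_pos h]

lemma pathCount_20 (b : Int) : pathCount 20 b = 0 := by
  rw [pathCount]
  rw [dif_neg (by omega : ¬ ((20:Int) < b ∧ 1 ≤ (20:Int) ∧ (20:Int) ≠ 20))]
  simp

lemma pathCount_self (b : Int) (h : b ≠ 20) : pathCount b b = 1 := by
  rw [pathCount]
  rw [dif_neg (by omega : ¬ (b < b ∧ 1 ≤ b ∧ b ≠ 20))]
  simp [h]

lemma fGo_eq_pathCount : ∀ (n : Nat) (a b : Int), 1 ≤ a → (b - a).toNat < n →
    fGo n a b = pathCount a b := by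
  intro n
  induction n with
  | zero => intro a b _ hfuel; omega
  | succ n ih =>
    intro a b ha hfuel
    rw [fGo]
    by_cases h20 : a = 20
    · rw [if_pos h20, h20, pathCount_20]
    · rw [if_neg h20]
      by_cases hab : a = b
      · rw [if_pos hab, hab, pathCount_self b (by omega)]
      · rw [if_neg hab]
        by_cases hgt : b < a
        · rw [if_pos hgt, pathCount_of_ge a b hgt]
        · rw [if_neg hgt]
          have hlt : a < b := by omega
          rw [pathCount_rec a b ⟨hlt, ha, h20⟩]
          rw [ih (a + 1) b (by omega) (by omega),
              ih (a * 3) b (by omega) (by omega),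
              ih (a * 2) b (by omega) (by omega),
              mul_comm a 3, mul_comm a 2]

lemma f_eq_pathCount (a b : Int) (ha : 1 ≤ a) : f a b = pathCount a b := by
  unfold f
  exact fGo_eq_pathCount _ a b ha (by omega)

-- invariant of B's DP dict: it holds exactly the counts for keys in [x, b]
def DictInv (d : PySem.Dict Int Int) (x b : Int) : Prop :=
  ∀ y, d.get? y = if x ≤ y ∧ y ≤ b then some (pathCount y b) else none

lemma pathCount_of_gt_target (y b : Int) (h : b < y) : pathCount y b = 0 :=
  pathCount_of_ge y b h

lemma step_inv (d : PySem.Dict Int Int) (x b : Int) (hx1 : 1 ≤ x) (hxb : x < b)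
    (hinv : DictInv d (x + 1) b) : DictInv (fAltStep d x) x b := by
  intro y
  unfold fAltStep
  have hget : ∀ z, (1 ≤ z ∨ z = x + 1) → x + 1 ≤ z → d.getD z 0 = pathCount z b := by
    intro z _ hz
    by_cases hzb : z ≤ b
    · rw [PySem.Dict.getD_eq_get?_getD, hinv z, if_pos ⟨hz, hzb⟩]; rfl
    · rw [PySem.Dict.getD_eq_get?_getD, hinv z, if_neg (by omega)]
      rw [pathCount_of_gt_target z b (by omega)]
      rfl
  by_cases h20 : x = 20
  · rw [if_pos h20, PySem.Dict.get?_insert]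
    by_cases hyx : y = x
    · rw [if_pos hyx, hyx, if_pos ⟨le_refl x, by omega⟩]
      rw [h20, pathCount_20]
    · rw [if_neg hyx, hinv y]
      split_ifs <;> first | rfl | omega
  · rw [if_neg h20, PySem.Dict.get?_insert]
    by_cases hyx : y = x
    · rw [if_pos hyx, hyx, if_pos ⟨le_refl x, by omega⟩]
      have hv : d.getD (x + 1) 0 + d.getD (3 * x) 0 + d.getD (2 * x) 0 = pathCount x b := by
        rw [hget (x + 1) (Or.inr rfl) (le_refl _),
            hget (3 * x) (Or.inl (by omega)) (by omega),
            hget (2 * x) (Or.inl (by omega)) (by omega)]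
        rw [pathCount_rec x b ⟨hxb, hx1, h20⟩]
      rw [hv]
    · rw [if_neg hyx, hinv y]
      split_ifs <;> first | rfl | omega

lemma fold_inv : ∀ (k : Nat) (x a b : Int) (d : PySem.Dict Int Int),
    1 ≤ a → a - 1 ≤ x → x < b → (x - (a - 1)).toNat = k → DictInv d (x + 1) b →
    DictInv ((PySem.List.pyRange x (a - 1) (-1)).foldl fAltStep d) a b := by
  intro k
  induction k with
  | zero =>
    intro x a b d ha hax hxb hk hinv
    have hx : x = a - 1 := by omega
    rw [hx, PySem.List.pyRange_neg_one_eq_nil (le_refl _)]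
    simpa [hx] using hinv
  | succ k ih =>
    intro x a b d ha hax hxb hk hinv
    have hxa : a ≤ x := by omega
    rw [PySem.List.pyRange_neg_one_cons (by omega : a - 1 < x)]
    rw [List.foldl_cons]
    exact ih (x - 1) a b (fAltStep d x) ha (by omega) (by omega) (by omega)
      (by simpa using step_inv d x b (by omega) hxb hinv)

lemma f_alt_eq_pathCount (a b : Int) (ha : 1 ≤ a) : f_alt a b = pathCount a b := by
  unfold f_alt
  by_cases h20 : a = 20
  · rw [if_pos h20, pathCount, dif_neg (by omega), if_pos h20]
  · rw [if_neg h20]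
    by_cases hab : a = b
    · rw [if_pos hab, pathCount, dif_neg (by omega), if_neg h20, if_pos hab]
    · rw [if_neg hab]
      by_cases hgt : b < a
      · rw [if_pos hgt, pathCount_of_ge a b hgt]
      · rw [if_neg hgt]
        have hlt : a < b := by omega
        have hinit : DictInv (PySem.Dict.empty.insert b (if b = 20 then 0 else 1)) ((b - 1) + 1) b := by
          intro y
          rw [PySem.Dict.get?_insert]
          by_cases hyb : y = b
          · rw [if_pos hyb, hyb, if_pos (show b - 1 + 1 ≤ b ∧ b ≤ b by omega)]
            by_cases hb20 : b = 20
            · rw [if_pos hb20, hb20, pathCount_20]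
            · rw [if_neg hb20, pathCount_self b hb20]
          · rw [if_neg hyb, PySem.Dict.get?_empty, if_neg (by omega)]
        have := fold_inv ((b - 1) - (a - 1)).toNat (b - 1) a b
          (PySem.Dict.empty.insert b (if b = 20 then 0 else 1)) ha (by omega) (by omega) rfl hinit
        rw [PySem.Dict.getD_eq_get?_getD, this a, if_pos ⟨le_refl a, by omega⟩]
        rfl

-- ===== VERDICT (by name: the statement is the Claim_ definition above) =====
theorem f_spec : Claim_equal_f := by
  intro a b _ hpre
  unfold Spec_f
  by_cases ha : 1 ≤ a
  · rw [f_eq_pathCount a b ha, f_alt_eq_pathCount a b ha]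
  · have hba : b ≤ a := by
      rcases hpre with h | h
      · omega
      · exact h
    have hfuel : (b - a).toNat = 0 := by omega
    unfold f f_alt
    rw [hfuel]
    rw [fGo]
    have h20 : a ≠ 20 := by omega
    rw [if_neg h20, if_neg h20]
    by_cases hab : a = b
    · rw [if_pos hab, if_pos hab]
    · rw [if_neg hab, if_neg hab, if_pos (by omega), if_pos (by omega)]
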